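-- pv_equiv track=rewrite | github.com/daniel-reich/ubiquitous-fiesta | SHdu4GwBQehhDm4xT_9.py | freed_prisoners
-- ===== SOURCE A (Python) =====
-- def freed_prisoners(prison):
--     index = 0
--     freed = 0
--     if prison[0] == 0:
--         return 0
--
--     while index < len(prison):
--         if prison[index] == 1:
--             freed += 1
--             prison = [abs(i - 1) for i in prison]
--         else:
--             index += 1
--
--     return freed
-- ===== SOURCE B (Python) =====
-- def freed_prisoners(prison):
--     if prison[0] == 0:
--         return 0
--     freed = 0
--     for cell in prison:
--         # apply the flips performed so far to this one cell, instead of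
--         # ever rebuilding the whole list
--         for _ in range(freed):
--             cell = abs(cell - 1)
--         if cell == 1:
--             freed += 1
--     return freed
-- ===== Notes on version B (the rewrite author's own statement) =====
-- stated objective: simpler
-- what changed: A restarts its scan at the freeing index and rebuilds the entire list with abs(i-1) on every freeing; B makes one pass over the list and instead replays the pending flips on the single cell it is looking at, keeping only the freed counter.
import Mathlib
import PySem

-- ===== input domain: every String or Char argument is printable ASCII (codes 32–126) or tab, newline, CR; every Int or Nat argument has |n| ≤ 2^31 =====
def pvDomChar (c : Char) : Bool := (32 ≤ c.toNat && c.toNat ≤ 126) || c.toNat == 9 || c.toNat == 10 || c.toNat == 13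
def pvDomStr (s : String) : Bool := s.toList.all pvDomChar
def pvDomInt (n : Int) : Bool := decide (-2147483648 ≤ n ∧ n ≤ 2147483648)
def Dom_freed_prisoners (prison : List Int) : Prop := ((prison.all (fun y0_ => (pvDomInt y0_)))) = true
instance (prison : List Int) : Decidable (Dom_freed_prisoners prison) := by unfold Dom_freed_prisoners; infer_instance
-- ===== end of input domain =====

-- B makes one pass and replays the pending flips on the cell at hand instead of
-- rebuilding the whole list on every freeing (objective: simpler, O(1) extra space).

-- ===== PORT A =====
-- the while loop: index advances, or (cell = 1) the whole list is remapped by |i - 1|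
def pvALoop (prison : List Int) (index : Nat) (freed : Int) : Int :=
  if h : index < prison.length then
    if prison.getD index 0 = 1 then
      pvALoop (prison.map (fun i => |i - 1|)) index (freed + 1)
    else
      pvALoop prison (index + 1) freed
  else freed
termination_by (prison.length - index, if prison.getD index 0 = 1 then 1 else 0)
decreasing_by
  · apply Prod.Lex.right'
    · simp
    · rename_i h1
      have hv : prison[index] = 1 := by
        simpa [List.getD_eq_getElem?_getD, List.getElem?_eq_getElem h] using h1
      simp [List.getD_eq_getElem?_getD, List.getElem?_eq_getElem h, List.getElem?_map, hv]
  · apply Prod.Lex.left; omega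

def freed_prisoners (prison : List Int) : Int :=
  match prison with
  | [] => 0          -- unreachable: Python raises IndexError here (excluded by Pre_)
  | p0 :: _ => if p0 = 0 then 0 else pvALoop prison 0 0

-- ===== PORT B =====
-- Source B's inner loop: 'for _ in range(freed): cell = abs(cell - 1)'
def pvBCell (cell : Int) (freed : Int) : Int :=
  (PySem.List.pyRange 0 freed 1).foldl (fun c _ => |c - 1|) cell

-- Source B's outer for loop, carrying the freed counter
def pvBLoop (l : List Int) (freed : Int) : Int :=
  match l with
  | [] => freed
  | c :: t => if pvBCell c freed = 1 then pvBLoop t (freed + 1) else pvBLoop t freed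

def freed_prisoners_alt (prison : List Int) : Int :=
  match prison with
  | [] => 0          -- unreachable: Source B raises IndexError here (excluded by Pre_)
  | p0 :: _ => if p0 = 0 then 0 else pvBLoop prison 0

-- ===== PRECONDITION & SPEC =====
-- Pre_ excludes only the empty list, on which both A and B raise IndexError at the first-element access
def Pre_freed_prisoners (prison : List Int) : Prop := prison ≠ []
instance (prison : List Int) : Decidable (Pre_freed_prisoners prison) := by
  unfold Pre_freed_prisoners; infer_instance
def pvWitness_freed_prisoners : List Int := ([1, 0, 1, 2])

def Spec_freed_prisoners (prison : List Int) (out : Int) : Prop := out = freed_prisoners_alt prison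
instance (prison : List Int) (out : Int) : Decidable (Spec_freed_prisoners prison out) := by unfold Spec_freed_prisoners; infer_instance

-- ===== CLAIM (what is proved, stated in full; the proofs are below) =====
def Claim_equal_freed_prisoners : Prop := ∀ (prison : List Int), Dom_freed_prisoners prison → Pre_freed_prisoners prison → Spec_freed_prisoners prison (freed_prisoners prison)

-- ===== LEMMAS AND PROOFS =====

-- f iterated q times, f x = |x - 1|
def pvFpow : Nat → Int → Int
  | 0, v => v
  | q + 1, v => pvFpow q (|v - 1|)

theorem pvFoldl_flip (l : List Int) (v : Int) :
    l.foldl (fun c _ => |c - 1|) v = pvFpow l.length v := by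
  induction l generalizing v with
  | nil => simp [pvFpow]
  | cons x t ih => simp [List.foldl, ih, pvFpow]

theorem pvBCell_eq (v : Int) (q : Nat) : pvBCell v (q : Int) = pvFpow q v := by
  rw [pvBCell, pvFoldl_flip, PySem.List.length_pyRange_one]
  norm_num

-- abstract count: remaining cells, relative flip count q
def pvDLoop : List Int → Nat → Int
  | [], _ => 0
  | v :: t, q => if pvFpow q v = 1 then 1 + pvDLoop t (q + 1) else pvDLoop t q

theorem pvDLoop_map (l : List Int) (q : Nat) :
    pvDLoop (l.map (fun i => |i - 1|)) q = pvDLoop l (q + 1) := by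
  induction l generalizing q with
  | nil => simp [pvDLoop]
  | cons v t ih =>
    simp only [List.map_cons, pvDLoop]
    have : pvFpow q (|v - 1|) = pvFpow (q + 1) v := by
      clear ih
      induction q generalizing v with
      | zero => simp [pvFpow]
      | succ q ih => simp [pvFpow]
    rw [this, ih, ih]

theorem pvALoop_eq (l : List Int) (index : Nat) (freed : Int) :
    pvALoop l index freed = freed + pvDLoop (l.drop index) 0 := by
  induction l, index, freed using pvALoop.induct with
  | case1 l index freed h h1 ih =>
    simp only [List.map_subtype, List.unattach_attach] at ih
    rw [pvALoop, dif_pos h, if_pos h1, ih]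
    have hd : l.drop index = l[index] :: l.drop (index + 1) :=
      List.drop_eq_getElem_cons h
    have hv : l[index] = 1 := by
      have := h1; rwa [List.getD_eq_getElem?_getD, List.getElem?_eq_getElem h] at this
    rw [← List.map_drop, pvDLoop_map, hd, hv]
    simp [pvDLoop, pvFpow]
    ring
  | case2 l index freed h h1 ih =>
    rw [pvALoop, dif_pos h, if_neg h1, ih]
    have hd : l.drop index = l[index] :: l.drop (index + 1) :=
      List.drop_eq_getElem_cons h
    have hv : l[index] ≠ 1 := by
      intro hc
      exact h1 (by rw [List.getD_eq_getElem?_getD, List.getElem?_eq_getElem h, hc]; rfl)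
    rw [hd]
    simp [pvDLoop, pvFpow, hv]
  | case3 l index freed h =>
    rw [pvALoop, dif_neg h, List.drop_eq_nil_of_le (by omega)]
    simp [pvDLoop]

theorem pvBLoop_eq (l : List Int) (q : Nat) :
    pvBLoop l (q : Int) = q + pvDLoop l q := by
  induction l generalizing q with
  | nil => simp [pvBLoop, pvDLoop]
  | cons v t ih =>
    simp only [pvBLoop, pvDLoop, pvBCell_eq]
    by_cases h : pvFpow q v = 1
    · rw [if_pos h, if_pos h, show (q : Int) + 1 = ((q + 1 : Nat) : Int) by push_cast; ring,
        ih (q + 1)]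
      push_cast; ring
    · rw [if_neg h, if_neg h, ih]

-- ===== VERDICT (by name: the statement is the Claim_ definition above) =====
theorem freed_prisoners_spec : Claim_equal_freed_prisoners := by
  intro prison _ hpre
  unfold Spec_freed_prisoners
  match prison with
  | [] => exact absurd rfl hpre
  | p0 :: t =>
    by_cases h0 : p0 = 0
    · simp [freed_prisoners, freed_prisoners_alt, h0]
    · simp only [freed_prisoners, freed_prisoners_alt, if_neg h0]
      rw [pvALoop_eq, show (0 : Int) = ((0 : Nat) : Int) from rfl, pvBLoop_eq]
      simp
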